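-- pv_equiv track=rewrite | github.com/nicologiannini/comp-prog | console.py | solve
-- ===== SOURCE A (Python) =====
-- import bisect
--
-- def solve(n, x, arr):
--     res = 0
--     map = {}
--     arr.sort()
--
--     for i in range(0, n):
--         if arr[i] in map:
--             map[arr[i]] += 1
--         else:
--             map[arr[i]] = 1
--
--     for i in range(0, n):
--         k = arr[i] * x
--         if map[arr[i]] == 0:
--             continue
--
--         map[arr[i]] -= 1
--         y = bisect.bisect_left(arr, k)
--
--         if y < n and arr[y] == k:
--             if map[k] > 0:
--                 map[k] -= 1
--             else:
--                 res += 1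
--         else:
--             res += 1
--
--     return res
-- ===== SOURCE B (Python) =====
-- def solve(n, x, arr):
--     arr.sort()
--     cnt = {}
--     for v in (arr[:n] if n > 0 else []):
--         cnt[v] = cnt.get(v, 0) + 1
--     res = 0
--     for v in sorted(cnt):
--         c = cnt[v]
--         if c == 0:
--             continue
--         k = v * x
--         if k == v:
--             res += c % 2
--             cnt[v] = 0
--         else:
--             p = min(c, cnt.get(k, 0))
--             res += c - p
--             cnt[v] = 0
--             cnt[k] = cnt.get(k, 0) - p
--     return res
-- ===== Notes on version B (the rewrite author's own statement) =====
-- stated objective: alternative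
-- what changed: A pairs element-by-element, re-running a binary search (bisect_left) and per-copy count decrements for every array entry; B collapses each block of equal values into one arithmetic step over the sorted distinct values of a counter (pair p = min(c, cnt[v*x]) copies at once, or c % 2 unmatched when v*x == v), so the per-element inner work disappears; it trades the bisect scan for dictionary arithmetic at the same overall O(n log n) cost.
-- outside the precondition, e.g. on solve(3, 2, [1, 2]): A raises IndexError, B returns 0
import Mathlib
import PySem

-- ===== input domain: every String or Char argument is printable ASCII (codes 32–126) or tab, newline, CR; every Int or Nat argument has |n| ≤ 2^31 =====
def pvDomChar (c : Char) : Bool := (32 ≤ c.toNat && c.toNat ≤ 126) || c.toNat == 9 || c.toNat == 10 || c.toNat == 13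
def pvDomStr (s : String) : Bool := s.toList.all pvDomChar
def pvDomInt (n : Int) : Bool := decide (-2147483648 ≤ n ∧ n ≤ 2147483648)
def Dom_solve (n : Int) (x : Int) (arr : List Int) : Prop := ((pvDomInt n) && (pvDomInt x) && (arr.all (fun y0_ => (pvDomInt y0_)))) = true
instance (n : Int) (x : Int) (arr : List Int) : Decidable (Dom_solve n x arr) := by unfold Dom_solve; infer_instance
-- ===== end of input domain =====

-- B replaces A's per-element pass (a bisect binary search and per-copy count decrements for
-- every array entry) by one arithmetic step per distinct sorted value of a counter
-- (objective: alternative — per-run counter arithmetic instead of per-element search).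
-- Both A and B sort arr in place; the equivalence proved here is about the RETURN value
-- (the mutation is identical: both sort arr ascending).

-- ===== PORT A =====
-- bisect.bisect_left is ported as PySem.List.bisectLeft (the library binary search); it is
-- applied to the already-sorted list s, where it is exact.
-- map[arr[i]] / map[k] are ported with getD 0: arr[i] (i < n) is always a key of map, and
-- map[k] is only read under the guard y < n ∧ s[y] = k, which forces k to be a key of map,
-- so Python's KeyError is unreachable and getD is exact there.
def solve (n : Int) (x : Int) (arr : List Int) : Int :=
  let s := PySem.List.sorted arr (fun v => v) false
  let m0 := (PySem.List.pyRange 0 n 1).foldl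
    (fun (d : PySem.Dict Int Int) i =>
      let v := PySem.List.pyGetD s i 0
      if d.contains v then d.modify v 0 (· + 1) else d.insert v 1)
    PySem.Dict.empty
  let fin := (PySem.List.pyRange 0 n 1).foldl
    (fun (st : PySem.Dict Int Int × Int) i =>
      let v := PySem.List.pyGetD s i 0
      let k := v * x
      if st.1.getD v 0 = 0 then st
      else
        let d := st.1.modify v 0 (· - 1)
        let y := PySem.List.bisectLeft s k
        if (y : Int) < n ∧ PySem.List.pyGetD s (y : Int) 0 = k then
          if 0 < d.getD k 0 then (d.modify k 0 (· - 1), st.2)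
          else (d, st.2 + 1)
        else (d, st.2 + 1))
    (m0, 0)
  fin.2

-- ===== PORT B =====
def solve_alt (n : Int) (x : Int) (arr : List Int) : Int :=
  let s := PySem.List.sorted arr (fun v => v) false
  let head := if 0 < n then PySem.List.slice s none (some n) else []
  let cnt := head.foldl (fun (d : PySem.Dict Int Int) v => d.insert v (d.getD v 0 + 1))
    PySem.Dict.empty
  let fin := (PySem.List.sorted cnt.keys (fun v => v) false).foldl
    (fun (st : PySem.Dict Int Int × Int) v =>
      let c := st.1.getD v 0
      if c = 0 then st
      else
        let k := v * x
        if k = v then (st.1.insert v 0, st.2 + PySem.Int.mod c 2)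
        else
          let q := st.1.getD k 0
          let p := min c q
          ((st.1.insert v 0).insert k (q - p), st.2 + (c - p)))
    (cnt, 0)
  fin.2

-- ===== PRECONDITION & SPEC =====
-- A raises IndexError (arr[i] in its first loop) whenever n > len(arr); exactly those
-- inputs are excluded.  (Negative or zero n is fine: both loops are empty and A returns 0.)
def Pre_solve (n : Int) (x : Int) (arr : List Int) : Prop := n ≤ (arr.length : Int)
instance (n : Int) (x : Int) (arr : List Int) : Decidable (Pre_solve n x arr) := by unfold Pre_solve; infer_instance
def pvWitness_solve : Int × Int × List Int := (4, 2, [2, 1, 4, 2])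

def Spec_solve (n : Int) (x : Int) (arr : List Int) (out : Int) : Prop := out = solve_alt n x arr
instance (n : Int) (x : Int) (arr : List Int) (out : Int) : Decidable (Spec_solve n x arr out) := by unfold Spec_solve; infer_instance

-- ===== CLAIM (what is proved, stated in full; the proofs are below) =====
def Claim_equal_solve : Prop := ∀ (n : Int) (x : Int) (arr : List Int), Dom_solve n x arr → Pre_solve n x arr → Spec_solve n x arr (solve n x arr)

-- ===== LEMMAS AND PROOFS =====

def stepA (x : Int) (t : List Int) (st : PySem.Dict Int Int × Int) (v : Int) :
    PySem.Dict Int Int × Int :=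
  if st.1.getD v 0 = 0 then st
  else
    let d := st.1.modify v 0 (· - 1)
    if v * x ∈ t then
      if 0 < d.getD (v * x) 0 then (d.modify (v * x) 0 (· - 1), st.2)
      else (d, st.2 + 1)
    else (d, st.2 + 1)

def stepB (x : Int) (st : PySem.Dict Int Int × Int) (v : Int) :
    PySem.Dict Int Int × Int :=
  let c := st.1.getD v 0
  if c = 0 then st
  else if v * x = v then (st.1.insert v 0, st.2 + PySem.Int.mod c 2)
  else
    let q := st.1.getD (v * x) 0
    ((st.1.insert v 0).insert (v * x) (q - min c q), st.2 + (c - min c q))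

-- the index loop over range(0, n) reads exactly the first n elements of s
lemma map_pyGetD_range_take (s : List Int) (n : Int) (h : n ≤ (s.length : Int)) :
    (PySem.List.pyRange 0 n 1).map (fun i => PySem.List.pyGetD s i 0) = s.take n.toNat := by
  rw [PySem.List.pyRange_one]
  apply List.ext_getElem
  · simp; omega
  · intro i h1 h2
    simp only [List.getElem_map, List.getElem_range, List.getElem_take]
    rw [PySem.List.pyGetD_eq_getElem]
    · simp at h1 ⊢
    · simp at h1; omega
    · simp at h1 ⊢; omega

-- A's counting loop builds Counter of the first n elements
lemma buildA_eq_counter (t : List Int) :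
    t.foldl (fun (d : PySem.Dict Int Int) v =>
      if d.contains v then d.modify v 0 (· + 1) else d.insert v 1) PySem.Dict.empty
      = PySem.Dict.counter t := by
  rw [PySem.Dict.counter_eq_foldl]
  apply List.foldl_ext
  intro d v _
  by_cases h : d.contains v
  · simp [h]
  · simp only [Bool.not_eq_true] at h
    simp [h, PySem.Dict.modify, PySem.Dict.getD_of_not_contains d 0 h]

-- A's bisect test succeeds exactly when k occurs among the first n elements of sorted s
lemma bisect_cond_iff (s : List Int) (n k : Int)
    (hs : s.Pairwise (· ≤ ·)) (hn : n ≤ (s.length : Int)) :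
    (((PySem.List.bisectLeft s k : Int) < n ∧
        PySem.List.pyGetD s (PySem.List.bisectLeft s k : Int) 0 = k)
      ↔ k ∈ s.take n.toNat) := by
  obtain ⟨hle, hlt, hge⟩ := PySem.List.bisectLeft_spec s k hs
  set y := PySem.List.bisectLeft s k with hy
  have hmono := List.pairwise_iff_getElem.mp hs
  rw [PySem.List.pyGetD_natCast]
  constructor
  · rintro ⟨h1, h2⟩
    have hylen : y < s.length := by omega
    rw [List.getD_eq_getElem s 0 hylen] at h2
    rw [List.mem_take_iff_getElem]
    exact ⟨y, by omega, h2⟩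
  · intro hk
    rw [List.mem_take_iff_getElem] at hk
    obtain ⟨j, hj, hjk⟩ := hk
    have hjlen : j < s.length := by
      have := List.length_take_le n.toNat s; omega
    have hyj : y ≤ j := by
      by_contra hc
      have := hlt j hjlen (by omega)
      omega
    have hylen : y < s.length := by omega
    have h3 : k ≤ s[y] := hge y hylen (le_refl _)
    have h4 : s[y] ≤ s[j] := by
      rcases Nat.eq_or_lt_of_le hyj with h | h
      · simp [h]
      · exact hmono y j hylen hjlen h
    refine ⟨by omega, ?_⟩
    rw [List.getD_eq_getElem s 0 hylen]
    omega

-- a nonempty sorted list starts with a block of copies of its head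
lemma sorted_run_decomp (u : List Int) (v : Int) (rest : List Int)
    (hs : u.Pairwise (· ≤ ·)) (hu : u = v :: rest) :
    ∃ c u', u = List.replicate c v ++ u' ∧ 0 < c ∧ (∀ w ∈ u', v < w) ∧
      u'.Pairwise (· ≤ ·) := by
  refine ⟨(u.takeWhile (· == v)).length, u.dropWhile (· == v), ?_, ?_, ?_, ?_⟩
  · have hrep : u.takeWhile (· == v) = List.replicate (u.takeWhile (· == v)).length v :=
      List.eq_replicate_iff.mpr ⟨rfl, fun b hb => by
        have := List.mem_takeWhile_imp hb; simpa using this⟩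
    conv_lhs => rw [← List.takeWhile_append_dropWhile (p := (· == v)) (l := u)]
    rw [← hrep]
  · subst hu; simp
  · intro w hw
    have hsub := List.dropWhile_sublist (l := u) (· == v)
    have hple : ∀ b ∈ u, v ≤ b := by
      intro b hb
      rw [hu] at hb hs
      rcases List.mem_cons.mp hb with h | h
      · omega
      · exact List.rel_of_pairwise_cons hs h
    have hne : u.dropWhile (· == v) ≠ [] := by
      intro h; rw [h] at hw; simp at hw
    have hhead := List.head_dropWhile_not (· == v) hne
    rcases hdw : u.dropWhile (· == v) with _ | ⟨b, tl⟩
    · exact absurd hdw hne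
    · have hbne : b ≠ v := by
        simp only [hdw, List.head_cons] at hhead; simpa using hhead
      have hbu : b ∈ u := hsub.mem (by rw [hdw]; simp)
      have hvb : v < b := lt_of_le_of_ne (hple b hbu) (Ne.symm hbne)
      rw [hdw] at hw
      rcases List.mem_cons.mp hw with h | h
      · omega
      · have hpw : (u.dropWhile (· == v)).Pairwise (· ≤ ·) := hs.sublist hsub
        rw [hdw] at hpw
        have := List.rel_of_pairwise_cons hpw h
        omega
  · exact hs.sublist (List.dropWhile_sublist _)

-- sorted(set(replicate c v ++ u')) = v :: sorted(set u'), when every element of u' exceeds v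
lemma vs_decomp (v : Int) (c : Nat) (u' : List Int) (hc : 0 < c) (hgt : ∀ w ∈ u', v < w) :
    PySem.List.sorted (PySem.Set.ofList (List.replicate c v ++ u')) (fun y => y) false
      = v :: PySem.List.sorted (PySem.Set.ofList u') (fun y => y) false := by
  have hperm' : (PySem.List.sorted (PySem.Set.ofList u') (fun y => y) false).Perm
      (PySem.Set.ofList u') := PySem.List.sorted_perm _ _ _
  have hnd' : (PySem.List.sorted (PySem.Set.ofList u') (fun y => y) false).Nodup :=
    hperm'.nodup_iff.mpr (PySem.Set.nodup_ofList u')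
  have hmem' : ∀ w, w ∈ PySem.List.sorted (PySem.Set.ofList u') (fun y => y) false ↔ w ∈ u' := by
    intro w
    rw [hperm'.mem_iff, PySem.Set.mem_ofList]
  apply PySem.List.sorted_eq_of_perm_of_pairwise_lt
  · rw [List.perm_ext_iff_of_nodup (by
      refine List.nodup_cons.mpr ⟨?_, hnd'⟩
      intro hv
      exact absurd rfl (ne_of_lt (hgt v ((hmem' v).mp hv)))) (PySem.Set.nodup_ofList _)]
    intro a
    rw [PySem.Set.mem_ofList]
    simp only [List.mem_cons, List.mem_append, List.mem_replicate, hmem' a]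
    constructor
    · rintro (h | h)
      · exact Or.inl ⟨by omega, h⟩
      · exact Or.inr h
    · rintro (⟨-, h⟩ | h)
      · exact Or.inl h
      · exact Or.inr h
  · refine List.pairwise_cons.mpr ⟨?_, ?_⟩
    · intro w hw; exact hgt w ((hmem' w).mp hw)
    · exact PySem.List.sorted_ofList_pairwise_lt (κ := Int) u'

lemma runA_ne (x : Int) (t : List Int) (v : Int) (hk : v * x ≠ v) :
    ∀ (c : Nat) (d : PySem.Dict Int Int) (r : Int),
    0 ≤ d.getD v 0 → d.getD v 0 ≤ (c : Int) → 0 ≤ d.getD (v * x) 0 →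
    (0 < d.getD (v * x) 0 → v * x ∈ t) →
    ((List.replicate c v).foldl (stepA x t) (d, r)).2
        = r + (d.getD v 0 - min (d.getD v 0) (d.getD (v * x) 0)) ∧
    ∀ w, ((List.replicate c v).foldl (stepA x t) (d, r)).1.getD w 0
        = if w = v then 0
          else if w = v * x then d.getD (v * x) 0 - min (d.getD v 0) (d.getD (v * x) 0)
          else d.getD w 0 := by
  intro c
  induction c with
  | zero =>
    intro d r h0 h1 h2 h3
    simp only [List.replicate, List.foldl_nil]
    constructor
    · omega
    · intro w
      split_ifs with hw1 hw2
      · subst hw1; omega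
      · subst hw2; omega
      · rfl
  | succ c ih =>
    intro d r h0 h1 h2 h3
    rw [List.replicate_succ, List.foldl_cons]
    by_cases hm0 : d.getD v 0 = 0
    · rw [show stepA x t (d, r) v = (d, r) by simp [stepA, hm0]]
      obtain ⟨ha, hb⟩ := ih d r h0 (by omega) h2 h3
      exact ⟨ha, hb⟩
    · have hm1 : 0 < d.getD v 0 := by omega
      set d1 := d.modify v 0 (· - 1) with hd1
      have g1v : d1.getD v 0 = d.getD v 0 - 1 := PySem.Dict.getD_modify_self d v 0 _
      have g1k : d1.getD (v * x) 0 = d.getD (v * x) 0 :=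
        PySem.Dict.getD_modify_of_ne d 0 _ hk
      have g1w : ∀ w, w ≠ v → d1.getD w 0 = d.getD w 0 := fun w hw =>
        PySem.Dict.getD_modify_of_ne d 0 _ hw
      by_cases hq0 : 0 < d.getD (v * x) 0
      · have hkt : v * x ∈ t := h3 hq0
        rw [show stepA x t (d, r) v = (d1.modify (v * x) 0 (· - 1), r) by
          simp only [stepA, if_neg hm0, if_pos hkt]
          rw [← hd1, g1k, if_pos hq0]]
        set d2 := d1.modify (v * x) 0 (· - 1) with hd2
        have g2v : d2.getD v 0 = d.getD v 0 - 1 := by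
          rw [PySem.Dict.getD_modify_of_ne d1 0 _ (Ne.symm hk), g1v]
        have g2k : d2.getD (v * x) 0 = d.getD (v * x) 0 - 1 := by
          rw [PySem.Dict.getD_modify_self, g1k]
        have g2w : ∀ w, w ≠ v → w ≠ v * x → d2.getD w 0 = d.getD w 0 := by
          intro w hw1 hw2
          rw [PySem.Dict.getD_modify_of_ne d1 0 _ hw2, g1w w hw1]
        obtain ⟨ha, hb⟩ := ih d2 r (by omega) (by omega) (by omega)
          (fun h => hkt)
        constructor
        · rw [ha, g2v, g2k]; omega
        · intro w
          rw [hb w]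
          split_ifs with hw1 hw2
          · rfl
          · rw [g2k]; omega
          · exact g2w w hw1 hw2
      · have hq : d.getD (v * x) 0 = 0 := by omega
        have hstep : stepA x t (d, r) v = (d1, r + 1) := by
          by_cases hkt : v * x ∈ t
          · simp only [stepA, if_neg hm0, if_pos hkt]
            rw [← hd1, g1k]
            simp [hq]
          · simp only [stepA, if_neg hm0, if_neg hkt]
            rw [hd1]
        rw [hstep]
        obtain ⟨ha, hb⟩ := ih d1 (r + 1) (by omega) (by omega) (by omega)
          (by rw [g1k]; exact h3)
        constructor
        · rw [ha, g1v, g1k]; omega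
        · intro w
          rw [hb w]
          split_ifs with hw1 hw2
          · rfl
          · rw [g1k]; omega
          · exact g1w w hw1

lemma runA_self (x : Int) (t : List Int) (v : Int) (hk : v * x = v) :
    ∀ (c : Nat) (d : PySem.Dict Int Int) (r : Int),
    0 ≤ d.getD v 0 → d.getD v 0 ≤ (c : Int) → (0 < d.getD v 0 → v ∈ t) →
    ((List.replicate c v).foldl (stepA x t) (d, r)).2 = r + d.getD v 0 % 2 ∧
    ∀ w, ((List.replicate c v).foldl (stepA x t) (d, r)).1.getD w 0
        = if w = v then 0 else d.getD w 0 := by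
  intro c
  induction c with
  | zero =>
    intro d r h0 h1 h2
    simp only [List.replicate, List.foldl_nil]
    refine ⟨by omega, fun w => ?_⟩
    split_ifs with hw
    · subst hw; omega
    · rfl
  | succ c ih =>
    intro d r h0 h1 h2
    rw [List.replicate_succ, List.foldl_cons]
    by_cases hm0 : d.getD v 0 = 0
    · rw [show stepA x t (d, r) v = (d, r) by simp [stepA, hm0]]
      exact ih d r h0 (by omega) h2
    · have hvt : v ∈ t := h2 (by omega)
      set d1 := d.modify v 0 (· - 1) with hd1
      have g1v : d1.getD v 0 = d.getD v 0 - 1 := PySem.Dict.getD_modify_self d v 0 _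
      have g1w : ∀ w, w ≠ v → d1.getD w 0 = d.getD w 0 := fun w hw =>
        PySem.Dict.getD_modify_of_ne d 0 _ hw
      by_cases hm1 : 0 < d.getD v 0 - 1
      · rw [show stepA x t (d, r) v = (d1.modify v 0 (· - 1), r) by
          simp only [stepA, if_neg hm0, hk, if_pos hvt]
          rw [← hd1, g1v, if_pos hm1]]
        set d2 := d1.modify v 0 (· - 1) with hd2
        have g2v : d2.getD v 0 = d.getD v 0 - 2 := by
          rw [PySem.Dict.getD_modify_self, g1v]; ring
        have g2w : ∀ w, w ≠ v → d2.getD w 0 = d.getD w 0 := by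
          intro w hw
          rw [PySem.Dict.getD_modify_of_ne d1 0 _ hw, g1w w hw]
        obtain ⟨ha, hb⟩ := ih d2 r (by omega) (by omega) (fun _ => hvt)
        refine ⟨by rw [ha, g2v]; omega, fun w => ?_⟩
        rw [hb w]
        split_ifs with hw
        · rfl
        · exact g2w w hw
      · rw [show stepA x t (d, r) v = (d1, r + 1) by
          simp only [stepA, if_neg hm0, hk, if_pos hvt]
          rw [← hd1, g1v, if_neg hm1]]
        obtain ⟨ha, hb⟩ := ih d1 (r + 1) (by omega) (by omega) (by omega)
        refine ⟨by rw [ha, g1v]; omega, fun w => ?_⟩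
        rw [hb w]
        split_ifs with hw
        · rfl
        · exact g1w w hw

lemma core (x : Int) (t : List Int) :
    ∀ (N : Nat) (u : List Int) (dA dB : PySem.Dict Int Int) (r : Int),
    u.length ≤ N →
    u.Pairwise (· ≤ ·) →
    (∀ w ∈ u, w ∈ t) →
    (∀ w, dB.getD w 0 = dA.getD w 0) →
    (∀ w, 0 ≤ dA.getD w 0) →
    (∀ w, dA.getD w 0 ≤ (u.count w : Int)) →
    (u.foldl (stepA x t) (dA, r)).2
      = ((PySem.List.sorted (PySem.Set.ofList u) (fun y => y) false).foldl (stepB x) (dB, r)).2 ∧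
    ∀ w, (u.foldl (stepA x t) (dA, r)).1.getD w 0
      = ((PySem.List.sorted (PySem.Set.ofList u) (fun y => y) false).foldl (stepB x) (dB, r)).1.getD w 0 := by
  intro N
  induction N with
  | zero =>
    intro u dA dB r hlen _ _ hBA _ _
    have : u = [] := List.eq_nil_of_length_eq_zero (by omega)
    subst this
    exact ⟨rfl, fun w => (hBA w).symm⟩
  | succ N ih =>
    intro u dA dB r hlen hpw hsub hBA h2 h3
    by_cases hnil : u = []
    · subst hnil
      exact ⟨rfl, fun w => (hBA w).symm⟩
    · obtain ⟨v, rest, hu⟩ : ∃ v rest, u = v :: rest := by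
        rcases u with _ | ⟨a, b⟩
        · exact absurd rfl hnil
        · exact ⟨a, b, rfl⟩
      obtain ⟨c, u', hdec, hc, hgt, hpw'⟩ := sorted_run_decomp u v rest hpw hu
      have hvnu' : v ∉ u' := fun h => absurd rfl (ne_of_lt (hgt v h))
      have hcount : ∀ w, w ≠ v → u.count w = u'.count w := by
        intro w hw
        have hb : (v == w) = false := beq_eq_false_iff_ne.mpr (Ne.symm hw)
        rw [hdec, List.count_append, List.count_replicate, hb]
        simp
      have hcv : (u.count v : Int) = (c : Int) := by
        rw [hdec, List.count_append, List.count_replicate,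
          List.count_eq_zero_of_not_mem hvnu']
        simp
      have hlen' : u'.length ≤ N := by
        have h5 : u.length = c + u'.length := by rw [hdec]; simp
        omega
      have hsub' : ∀ w ∈ u', w ∈ t := fun w hw =>
        hsub w (by rw [hdec]; exact List.mem_append_right _ hw)
      have hvt : v ∈ t := hsub v (by rw [hu]; simp)
      have hvsu := vs_decomp v c u' hc hgt
      rw [← hdec] at hvsu
      set m := dA.getD v 0 with hm
      have hBv : dB.getD v 0 = m := hBA v
      have hmc : m ≤ (c : Int) := by rw [hm, ← hcv]; exact h3 v
      have hm0 : 0 ≤ m := h2 v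
      set pa := (List.replicate c v).foldl (stepA x t) (dA, r) with hpa
      set sb := stepB x (dB, r) v with hsb
      have hkey : pa.2 = sb.2 ∧ ∀ w, pa.1.getD w 0 = sb.1.getD w 0 := by
        by_cases hk : v * x = v
        · obtain ⟨ha, hb⟩ := runA_self x t v hk c dA r hm0 hmc (fun _ => hvt)
          by_cases hmz : m = 0
          · have hstep : sb = (dB, r) := by
              rw [hsb]; simp only [stepB]; rw [hBv, if_pos hmz]
            rw [hstep]
            refine ⟨by rw [ha]; show r + m % 2 = r; omega, fun w => ?_⟩
            rw [hb w]
            split_ifs with hw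
            · subst hw; rw [hBv, hmz]
            · exact (hBA w).symm
          · have hstep : sb = (dB.insert v 0, r + PySem.Int.mod m 2) := by
              rw [hsb]; simp only [stepB]; rw [hBv, if_neg hmz, if_pos hk]
            rw [hstep]
            refine ⟨?_, fun w => ?_⟩
            · rw [ha]
              show r + m % 2 = r + PySem.Int.mod m 2
              rw [PySem.Int.mod_eq_emod_of_pos (by norm_num)]
            rw [hb w]
            by_cases hw : w = v
            · subst hw; rw [if_pos rfl, PySem.Dict.getD_insert_self]
            · rw [if_neg hw, PySem.Dict.getD_insert_of_ne dB 0 0 hw, hBA w]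
        · have hq0 : 0 ≤ dA.getD (v * x) 0 := h2 (v * x)
          have hqt : 0 < dA.getD (v * x) 0 → v * x ∈ t := by
            intro h
            have h6 := h3 (v * x)
            have h7 : 0 < u.count (v * x) := by omega
            exact hsub (v * x) (List.count_pos_iff.mp h7)
          obtain ⟨ha, hb⟩ := runA_ne x t v hk c dA r hm0 hmc hq0 hqt
          set q := dA.getD (v * x) 0 with hq
          have hBq : dB.getD (v * x) 0 = q := hBA (v * x)
          by_cases hmz : m = 0
          · have hstep : sb = (dB, r) := by
              rw [hsb]; simp only [stepB]; rw [hBv, if_pos hmz]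
            rw [hstep]
            refine ⟨by rw [ha]; show r + (m - min m q) = r; omega, fun w => ?_⟩
            rw [hb w]
            split_ifs with hw1 hw2
            · subst hw1; rw [hBv, hmz]
            · subst hw2; rw [hBq]; show q - min m q = q; omega
            · exact (hBA w).symm
          · have hstep : sb = ((dB.insert v 0).insert (v * x) (q - min m q), r + (m - min m q)) := by
              rw [hsb]; simp only [stepB]; rw [hBv, hBq, if_neg hmz, if_neg hk]
            rw [hstep]
            refine ⟨by rw [ha], fun w => ?_⟩
            rw [hb w]
            by_cases hw2 : w = v * x
            · subst hw2; rw [if_neg (Ne.symm (fun h => hk h.symm)), if_pos rfl,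
                PySem.Dict.getD_insert_self]
            · rw [PySem.Dict.getD_insert_of_ne _ _ 0 hw2]
              by_cases hw1 : w = v
              · subst hw1; rw [if_pos rfl, PySem.Dict.getD_insert_self]
              · rw [if_neg hw1, if_neg hw2, PySem.Dict.getD_insert_of_ne dB 0 0 hw1, hBA w]
      -- invariants for the tail
      have h2' : ∀ w, 0 ≤ pa.1.getD w 0 := by
        intro w
        by_cases hk : v * x = v
        · rw [(runA_self x t v hk c dA r hm0 hmc (fun _ => hvt)).2 w]
          split_ifs with hw
          · omega
          · exact h2 w
        · have hq0 : 0 ≤ dA.getD (v * x) 0 := h2 (v * x)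
          have hqt : 0 < dA.getD (v * x) 0 → v * x ∈ t := by
            intro h
            have h6 := h3 (v * x)
            have h7 : 0 < u.count (v * x) := by omega
            exact hsub (v * x) (List.count_pos_iff.mp h7)
          rw [(runA_ne x t v hk c dA r hm0 hmc hq0 hqt).2 w]
          split_ifs with hw1 hw2
          · omega
          · omega
          · exact h2 w
      have h3' : ∀ w, pa.1.getD w 0 ≤ (u'.count w : Int) := by
        intro w
        by_cases hwv : w = v
        · rw [hwv, List.count_eq_zero_of_not_mem hvnu']
          by_cases hk : v * x = v
          · rw [(runA_self x t v hk c dA r hm0 hmc (fun _ => hvt)).2 v, if_pos rfl]; simp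
          · have hq0 : 0 ≤ dA.getD (v * x) 0 := h2 (v * x)
            have hqt : 0 < dA.getD (v * x) 0 → v * x ∈ t := by
              intro h
              have h6 := h3 (v * x)
              have h7 : 0 < u.count (v * x) := by omega
              exact hsub (v * x) (List.count_pos_iff.mp h7)
            rw [(runA_ne x t v hk c dA r hm0 hmc hq0 hqt).2 v, if_pos rfl]; simp
        · have hcw : (u'.count w : Int) = (u.count w : Int) := by rw [hcount w hwv]
          rw [hcw]
          by_cases hk : v * x = v
          · rw [(runA_self x t v hk c dA r hm0 hmc (fun _ => hvt)).2 w, if_neg hwv]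
            exact h3 w
          · have hq0 : 0 ≤ dA.getD (v * x) 0 := h2 (v * x)
            have hqt : 0 < dA.getD (v * x) 0 → v * x ∈ t := by
              intro h
              have h6 := h3 (v * x)
              have h7 : 0 < u.count (v * x) := by omega
              exact hsub (v * x) (List.count_pos_iff.mp h7)
            rw [(runA_ne x t v hk c dA r hm0 hmc hq0 hqt).2 w, if_neg hwv]
            split_ifs with hw2
            · have := h3 (v * x)
              rw [← hw2] at *
              omega
            · exact h3 w
      obtain ⟨hres, hdict⟩ := ih u' pa.1 sb.1 pa.2 hlen' hpw' hsub'
        (fun w => (hkey.2 w).symm) h2' h3'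
      have hAside : u.foldl (stepA x t) (dA, r) = u'.foldl (stepA x t) pa := by
        conv_lhs => rw [hdec]
        rw [List.foldl_append, ← hpa]
      have hBside : (PySem.List.sorted (PySem.Set.ofList u) (fun y => y) false).foldl
          (stepB x) (dB, r) = (PySem.List.sorted (PySem.Set.ofList u') (fun y => y) false).foldl
          (stepB x) sb := by
        rw [hvsu, List.foldl_cons, ← hsb]
      have hpaeta : pa = (pa.1, pa.2) := rfl
      have hsbeta : sb = (sb.1, pa.2) := by
        rw [hkey.1]
      constructor
      · rw [hAside, hBside, hpaeta, hsbeta]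
        exact hres
      · intro w
        rw [hAside, hBside, hpaeta, hsbeta]
        exact hdict w


-- ===== VERDICT (by name: the statement is the Claim_ definition above) =====
theorem solve_spec : Claim_equal_solve := by
  intro n x arr _ hpre
  unfold Spec_solve solve solve_alt
  set s := PySem.List.sorted arr (fun v => v) false with hsdef
  have hn : n ≤ (s.length : Int) := by
    rw [hsdef, PySem.List.length_sorted]; exact hpre
  have hs : s.Pairwise (· ≤ ·) := by
    have h := PySem.List.sorted_pairwise arr (fun v => v)
    rw [← hsdef] at h
    exact h
  set t := s.take n.toNat with htdef
  show (List.foldl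
      (fun (st : PySem.Dict Int Int × Int) i =>
        let v := PySem.List.pyGetD s i 0
        let k := v * x
        if st.1.getD v 0 = 0 then st
        else
          let d := st.1.modify v 0 (· - 1)
          let y := PySem.List.bisectLeft s k
          if (y : Int) < n ∧ PySem.List.pyGetD s (y : Int) 0 = k then
            if 0 < d.getD k 0 then (d.modify k 0 (· - 1), st.2)
            else (d, st.2 + 1)
          else (d, st.2 + 1))
      (List.foldl
        (fun (d : PySem.Dict Int Int) i =>
          let v := PySem.List.pyGetD s i 0
          if d.contains v then d.modify v 0 (· + 1) else d.insert v 1)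
        PySem.Dict.empty (PySem.List.pyRange 0 n 1), 0)
      (PySem.List.pyRange 0 n 1)).2
    = (List.foldl (stepB x)
      (List.foldl (fun (d : PySem.Dict Int Int) v => d.insert v (d.getD v 0 + 1))
        PySem.Dict.empty (if 0 < n then PySem.List.slice s none (some n) else []), 0)
      (PySem.List.sorted (List.foldl
        (fun (d : PySem.Dict Int Int) v => d.insert v (d.getD v 0 + 1))
        PySem.Dict.empty (if 0 < n then PySem.List.slice s none (some n) else [])).keys
        (fun v => v) false)).2
  have hmap : (PySem.List.pyRange 0 n 1).map (fun i => PySem.List.pyGetD s i 0) = t :=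
    map_pyGetD_range_take s n hn
  -- A's first loop builds Counter t
  have e1 : (PySem.List.pyRange 0 n 1).foldl
      (fun (d : PySem.Dict Int Int) i =>
        let v := PySem.List.pyGetD s i 0
        if d.contains v then d.modify v 0 (· + 1) else d.insert v 1)
      PySem.Dict.empty = PySem.Dict.counter t := by
    rw [← buildA_eq_counter t]
    conv_rhs => rw [← hmap]
    rw [List.foldl_map]
  -- A's second loop is the stepA fold over t
  have e2 : ∀ init : PySem.Dict Int Int × Int, (PySem.List.pyRange 0 n 1).foldl
      (fun (st : PySem.Dict Int Int × Int) i =>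
        let v := PySem.List.pyGetD s i 0
        let k := v * x
        if st.1.getD v 0 = 0 then st
        else
          let d := st.1.modify v 0 (· - 1)
          let y := PySem.List.bisectLeft s k
          if (y : Int) < n ∧ PySem.List.pyGetD s (y : Int) 0 = k then
            if 0 < d.getD k 0 then (d.modify k 0 (· - 1), st.2)
            else (d, st.2 + 1)
          else (d, st.2 + 1)) init
      = t.foldl (stepA x t) init := by
    intro init
    have estep : (PySem.List.pyRange 0 n 1).foldl
        (fun (st : PySem.Dict Int Int × Int) i =>
          let v := PySem.List.pyGetD s i 0
          let k := v * x
          if st.1.getD v 0 = 0 then st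
          else
            let d := st.1.modify v 0 (· - 1)
            let y := PySem.List.bisectLeft s k
            if (y : Int) < n ∧ PySem.List.pyGetD s (y : Int) 0 = k then
              if 0 < d.getD k 0 then (d.modify k 0 (· - 1), st.2)
              else (d, st.2 + 1)
            else (d, st.2 + 1)) init
        = t.foldl (fun (st : PySem.Dict Int Int × Int) v =>
          if st.1.getD v 0 = 0 then st
          else
            let d := st.1.modify v 0 (· - 1)
            if (PySem.List.bisectLeft s (v * x) : Int) < n ∧
                PySem.List.pyGetD s (PySem.List.bisectLeft s (v * x) : Int) 0 = v * x then
              if 0 < d.getD (v * x) 0 then (d.modify (v * x) 0 (· - 1), st.2)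
              else (d, st.2 + 1)
            else (d, st.2 + 1)) init := by
      conv_rhs => rw [← hmap]
      rw [List.foldl_map]
    rw [estep]
    apply List.foldl_ext
    intro st v _
    by_cases h0 : st.1.getD v 0 = 0
    · simp [stepA, h0]
    · simp only [stepA, if_neg h0]
      by_cases hc : v * x ∈ t
      · rw [if_pos ((bisect_cond_iff s n (v * x) hs hn).mpr (htdef ▸ hc)), if_pos hc]
      · rw [if_neg (fun hcond => hc (htdef ▸ ((bisect_cond_iff s n (v * x) hs hn).mp hcond))),
          if_neg hc]
  -- B's head slice is t, so B's counter is Counter t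
  have e3 : (if 0 < n then PySem.List.slice s none (some n) else []) = t := by
    split_ifs with h
    · rw [PySem.List.slice_to s (le_of_lt h), htdef]
    · rw [htdef]
      have hz : n.toNat = 0 := by omega
      rw [hz]
      rfl
  rw [e1, e2, e3, PySem.Dict.foldl_insert_getD_add_one_eq_counter, PySem.Dict.keys_counter]
  have hpwt : t.Pairwise (· ≤ ·) := by
    rw [htdef]; exact hs.sublist (List.take_sublist _ _)
  obtain ⟨hres, -⟩ := core x t t.length t (PySem.Dict.counter t) (PySem.Dict.counter t) 0
    le_rfl hpwt (fun w hw => hw) (fun w => rfl)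
    (fun w => by rw [PySem.Dict.getD_counter]; exact Int.natCast_nonneg _)
    (fun w => le_of_eq (PySem.Dict.getD_counter t w))
  exact hres
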